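-- pv_equiv track=rewrite | github.com/an-banh-CLV/code-review-script | Test17.py | check_parameter_order
-- ===== SOURCE A (Python) =====
-- def check_parameter_order(parameters, parameter_hierarchy):
--     """Checks the order of parameters against the hierarchy and returns the order as a string."""
--     correct_order = True
--     last_index = -1
--     filtered_params = [param for param in parameters if param in parameter_hierarchy]
--
--     for param in filtered_params:
--         param_index = parameter_hierarchy.index(param)
--         if param_index < last_index:
--             correct_order = False
--             break
--         last_index = param_index
--
--     if correct_order:
--         return None, None
--
--     parameter_order_str = ', '.join([param for param in parameter_hierarchy if param in filtered_params])
--     current_order_str = ', '.join([param for param in filtered_params])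
--     return parameter_order_str, current_order_str
-- ===== SOURCE B (Python) =====
-- def check_parameter_order(parameters, parameter_hierarchy):
--     """Checks the order of parameters against the hierarchy and returns the order as a string."""
--     # Pass 1: dedupe the hierarchy (first occurrences), remembering its name set.
--     seen = set()
--     unique_hierarchy = []
--     for h in parameter_hierarchy:
--         if h not in seen:
--             seen.add(h)
--             unique_hierarchy.append(h)
--     queue = [p for p in parameters if p in seen]
--     # Pass 2: consumption walk — try to consume the whole queue by one sweep
--     # over the deduped hierarchy; the order is correct iff everything is consumed.
--     i = 0
--     for h in unique_hierarchy:
--         while i < len(queue) and queue[i] == h: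
--             i += 1
--     if i == len(queue):
--         return None, None
--     present = set(queue)
--     parameter_order_str = ', '.join(p for p in parameter_hierarchy if p in present)
--     current_order_str = ', '.join(queue)
--     return parameter_order_str, current_order_str
-- ===== Notes on version B (the rewrite author's own statement) =====
-- stated objective: faster
-- what changed: Replaces A's rank-based monotone scan (repeated parameter_hierarchy.index lookups compared against a running last_index) by an index-free consumption walk: the hierarchy is deduplicated once and a single sweep over it tries to consume the filtered parameter queue block by block; the order is correct iff the whole queue is consumed, so no rank is ever computed or compared.
import Mathlib
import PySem

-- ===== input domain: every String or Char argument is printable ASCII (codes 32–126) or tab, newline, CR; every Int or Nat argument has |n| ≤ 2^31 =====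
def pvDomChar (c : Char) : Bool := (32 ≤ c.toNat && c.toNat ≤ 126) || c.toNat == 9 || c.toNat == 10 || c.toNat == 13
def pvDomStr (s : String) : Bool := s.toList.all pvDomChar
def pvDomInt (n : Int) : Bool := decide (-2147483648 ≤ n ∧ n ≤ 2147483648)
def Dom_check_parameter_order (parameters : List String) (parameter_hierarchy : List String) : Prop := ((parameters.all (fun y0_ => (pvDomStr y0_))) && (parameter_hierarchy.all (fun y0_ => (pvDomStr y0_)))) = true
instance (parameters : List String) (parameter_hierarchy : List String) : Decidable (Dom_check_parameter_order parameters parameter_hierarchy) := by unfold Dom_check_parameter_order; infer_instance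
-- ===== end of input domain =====

-- B replaces A's rank-based monotone scan (repeated hierarchy.index lookups against a
-- running last_index) by an index-free consumption walk over the deduplicated hierarchy
-- (one sweep consumes the filtered parameter queue block by block; correct iff all consumed).

-- ===== PORT A =====
-- the for-loop of A: state (correct_order, last_index) with break; returning `false`
-- encodes the broken-out `correct_order = False` case.  Python's list.index would raise
-- ValueError on a missing element, but every element fed to the loop passed the
-- membership filter, so the `.getD 0` default is never used.
def pvLoopA (hier : List String) : List String → Int → Bool
  | [], _ => true
  | p :: rest, last =>
    let i : Int := (((PySem.List.index? hier p).getD 0 : Nat) : Int)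
    if i < last then false else pvLoopA hier rest i

def check_parameter_order (parameters : List String) (parameter_hierarchy : List String) : Option String × Option String :=
  let filtered := parameters.filter (fun p => parameter_hierarchy.contains p)
  if pvLoopA parameter_hierarchy filtered (-1) then (none, none)
  else
    (some (PySem.Str.join ", " (parameter_hierarchy.filter (fun p => filtered.contains p))),
     some (PySem.Str.join ", " filtered))

-- ===== PORT B =====
-- Source B pass 1: the for-loop over parameter_hierarchy building (seen, unique_hierarchy)
def pvDedupB : List String → PySem.Set String → PySem.Set String × List String
  | [], seen => (seen, [])
  | h :: t, seen =>
    if PySem.Set.contains seen h then pvDedupB t seen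
    else
      let r := pvDedupB t (PySem.Set.add seen h)
      (r.1, h :: r.2)

-- Source B pass 2: for h in unique_hierarchy: the inner while advances the pointer past the
-- prefix of queue entries equal to h (the not-yet-consumed suffix is the list carried here)
def pvWalkB : List String → List String → Bool
  | [], rest => rest.isEmpty
  | h :: t, rest => pvWalkB t (rest.dropWhile (fun x => x == h))

def check_parameter_order_alt (parameters : List String) (parameter_hierarchy : List String) : Option String × Option String :=
  let su := pvDedupB parameter_hierarchy PySem.Set.empty
  let queue := parameters.filter (fun p => PySem.Set.contains su.1 p)
  if pvWalkB su.2 queue then (none, none)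
  else
    let present := PySem.Set.ofList queue
    (some (PySem.Str.join ", " (parameter_hierarchy.filter (fun p => PySem.Set.contains present p))),
     some (PySem.Str.join ", " queue))

-- ===== PRECONDITION & SPEC =====
def Spec_check_parameter_order (parameters : List String) (parameter_hierarchy : List String) (out : Option String × Option String) : Prop := out = check_parameter_order_alt parameters parameter_hierarchy
instance (parameters : List String) (parameter_hierarchy : List String) (out : Option String × Option String) : Decidable (Spec_check_parameter_order parameters parameter_hierarchy out) := by unfold Spec_check_parameter_order; infer_instance

-- ===== CLAIM (what is proved, stated in full; the proofs are below) =====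
def Claim_equal_check_parameter_order : Prop := ∀ (parameters : List String) (parameter_hierarchy : List String), Dom_check_parameter_order parameters parameter_hierarchy → Spec_check_parameter_order parameters parameter_hierarchy (check_parameter_order parameters parameter_hierarchy)

-- ===== LEMMAS AND PROOFS =====

-- first-occurrence rank in the hierarchy (proof-side abbreviation)
def pvRk (hier : List String) (p : String) : Nat := (PySem.List.index? hier p).getD 0

lemma mem_pvDedupB_fst : ∀ (l : List String) (s : PySem.Set String) (x : String),
    x ∈ (pvDedupB l s).1 ↔ x ∈ l ∨ x ∈ s := by
  intro l
  induction l with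
  | nil => intro s x; simp [pvDedupB]
  | cons h t ih =>
    intro s x
    by_cases hc : PySem.Set.contains s h = true
    · have hhs : h ∈ s := (PySem.Set.contains_iff s h).mp hc
      simp only [pvDedupB, hc, if_pos]
      rw [ih]
      constructor
      · rintro (hx | hx)
        · exact Or.inl (List.mem_cons_of_mem _ hx)
        · exact Or.inr hx
      · rintro (hx | hx)
        · rcases List.mem_cons.mp hx with rfl | hx
          · exact Or.inr hhs
          · exact Or.inl hx
        · exact Or.inr hx
    · simp only [pvDedupB, hc, if_neg, Bool.false_eq_true, not_false_iff]
      rw [ih, PySem.Set.mem_add _ _ _]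
      constructor
      · rintro (hx | hx | rfl)
        · exact Or.inl (List.mem_cons_of_mem _ hx)
        · exact Or.inr hx
        · exact Or.inl (List.mem_cons_self)
      · rintro (hx | hx)
        · rcases List.mem_cons.mp hx with rfl | hx
          · exact Or.inr (Or.inr rfl)
          · exact Or.inl hx
        · exact Or.inr (Or.inl hx)

lemma mem_pvDedupB_snd : ∀ (l : List String) (s : PySem.Set String) (x : String),
    x ∈ (pvDedupB l s).2 ↔ x ∈ l ∧ x ∉ s := by
  intro l
  induction l with
  | nil => intro s x; simp [pvDedupB]
  | cons h t ih =>
    intro s x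
    by_cases hc : PySem.Set.contains s h = true
    · have hhs : h ∈ s := (PySem.Set.contains_iff s h).mp hc
      simp only [pvDedupB, hc, if_pos]
      rw [ih]
      constructor
      · rintro ⟨hx, hns⟩; exact ⟨List.mem_cons_of_mem _ hx, hns⟩
      · rintro ⟨hx, hns⟩
        rcases List.mem_cons.mp hx with rfl | hx
        · exact absurd hhs hns
        · exact ⟨hx, hns⟩
    · have hhs : h ∉ s := fun hm => hc ((PySem.Set.contains_iff s h).mpr hm)
      simp only [pvDedupB, hc, if_neg, Bool.false_eq_true, not_false_iff, List.mem_cons]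
      rw [ih, PySem.Set.mem_add _ _ _]
      constructor
      · rintro (rfl | ⟨hx, hns⟩)
        · exact ⟨Or.inl rfl, hhs⟩
        · exact ⟨Or.inr hx, fun hm => hns (Or.inl hm)⟩
      · rintro ⟨rfl | hx, hns⟩
        · exact Or.inl rfl
        · by_cases hxh : x = h
          · exact Or.inl hxh
          · exact Or.inr ⟨hx, fun hm => by
              rcases hm with hm | rfl
              · exact hns hm
              · exact hxh rfl⟩

lemma pvRk_cons_of_ne (h x : String) (t : List String) (hx : x ∈ t) (hne : x ≠ h) :
    pvRk (h :: t) x = pvRk t x + 1 := by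
  unfold pvRk
  rw [PySem.List.index?_cons_of_ne _ (fun he => hne he.symm)]
  rcases Option.isSome_iff_exists.mp ((PySem.List.index?_isSome_iff t x).mpr hx) with ⟨k, hk⟩
  rw [hk]; rfl

lemma pairwise_pvDedupB : ∀ (l : List String) (s : PySem.Set String),
    List.Pairwise (fun a b => pvRk l a < pvRk l b) (pvDedupB l s).2 := by
  intro l
  induction l with
  | nil => intro s; simp [pvDedupB]
  | cons h t ih =>
    intro s
    have lift : ∀ (s' : PySem.Set String), h ∉ (pvDedupB t s').2 →
        List.Pairwise (fun a b => pvRk (h :: t) a < pvRk (h :: t) b) (pvDedupB t s').2 := by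
      intro s' hh
      refine (ih s').imp_of_mem ?_
      intro a b ha hb hab
      have hat := ((mem_pvDedupB_snd t s' a).mp ha).1
      have hbt := ((mem_pvDedupB_snd t s' b).mp hb).1
      have hane : a ≠ h := fun he => hh (he ▸ ha)
      have hbne : b ≠ h := fun he => hh (he ▸ hb)
      rw [pvRk_cons_of_ne h a t hat hane, pvRk_cons_of_ne h b t hbt hbne]
      omega
    by_cases hc : PySem.Set.contains s h = true
    · have hhs : h ∈ s := (PySem.Set.contains_iff s h).mp hc
      simp only [pvDedupB, hc, if_pos]
      exact lift s (fun hm => ((mem_pvDedupB_snd t s h).mp hm).2 hhs)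
    · simp only [pvDedupB, hc, if_neg, Bool.false_eq_true, not_false_iff]
      have hhadd : h ∉ (pvDedupB t (PySem.Set.add s h)).2 := fun hm =>
        ((mem_pvDedupB_snd t _ h).mp hm).2 ((PySem.Set.mem_add _ _ _).mpr (Or.inr rfl))
      refine List.pairwise_cons.mpr ⟨?_, lift _ hhadd⟩
      intro b hb
      have hbt := ((mem_pvDedupB_snd t _ b).mp hb).1
      have hbne : b ≠ h := fun he => hhadd (he ▸ hb)
      have h0 : pvRk (h :: t) h = 0 := by
        unfold pvRk; rw [PySem.List.index?_cons_self]; rfl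
      rw [h0, pvRk_cons_of_ne h b t hbt hbne]
      omega

lemma mem_dropWhileEq {x h : String} {q : List String} (hx : x ∈ q) (hne : x ≠ h) :
    x ∈ q.dropWhile (fun y => y == h) := by
  have hsplit := List.takeWhile_append_dropWhile (p := fun y => y == h) (l := q)
  rw [← hsplit] at hx
  rcases List.mem_append.mp hx with hx | hx
  · have := List.mem_takeWhile_imp hx
    exact absurd (by simp at this; exact this) hne
  · exact hx

lemma pvWalkB_false_of_missing : ∀ (u q : List String), (∃ x ∈ q, x ∉ u) → pvWalkB u q = false := by
  intro u
  induction u with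
  | nil =>
    rintro q ⟨x, hx, -⟩
    cases q with
    | nil => cases hx
    | cons a t => rfl
  | cons h t ih =>
    rintro q ⟨x, hx, hnu⟩
    have hne : x ≠ h := fun he => hnu (he ▸ List.mem_cons_self)
    have hnt : x ∉ t := fun hm => hnu (List.mem_cons_of_mem _ hm)
    exact ih _ ⟨x, mem_dropWhileEq hx hne, hnt⟩

lemma not_chain_of_inner (rk : String → Nat) (h : String) (t : List String)
    (hh : ∀ b ∈ t, rk h < rk b) :
    ∀ (q : List String) (x : String), (∀ y ∈ q, y ∈ h :: t) → x ∈ t → h ∈ q →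
      ¬ List.IsChain (fun a b => rk a ≤ rk b) (x :: q) := by
  intro q
  induction q with
  | nil => intro x _ _ hq; cases hq
  | cons y q2 ih =>
    intro x hq hxt hhq hchain
    rw [List.isChain_cons_cons] at hchain
    by_cases hy : y = h
    · subst hy
      exact absurd hchain.1 (by have := hh x hxt; omega)
    · have hyt : y ∈ t := by
        rcases List.mem_cons.mp (hq y List.mem_cons_self) with rfl | hm
        · exact absurd rfl hy
        · exact hm
      have hhq2 : h ∈ q2 := by
        rcases List.mem_cons.mp hhq with rfl | hm
        · exact absurd rfl hy
        · exact hm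
      exact ih y (fun z hz => hq z (List.mem_cons_of_mem _ hz)) hyt hhq2 hchain.2

lemma pvWalkB_iff_chain (rk : String → Nat) : ∀ (u q : List String),
    List.Pairwise (fun a b => rk a < rk b) u → (∀ x ∈ q, x ∈ u) →
    (pvWalkB u q = true ↔ List.IsChain (fun a b => rk a ≤ rk b) q) := by
  intro u
  induction u with
  | nil =>
    intro q _ hq
    cases q with
    | nil => simp [pvWalkB]
    | cons x t => cases hq x List.mem_cons_self
  | cons h t ih =>
    intro q hp hq
    have hh : ∀ b ∈ t, rk h < rk b := (List.pairwise_cons.mp hp).1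
    have ht : List.Pairwise (fun a b => rk a < rk b) t := (List.pairwise_cons.mp hp).2
    have hhnt : h ∉ t := fun hm => absurd (hh h hm) (by omega)
    induction q with
    | nil =>
      show pvWalkB t ([].dropWhile (fun x => x == h)) = true ↔ _
      rw [List.dropWhile_nil, ih [] ht (by simp)]
    | cons x q' ihq =>
      have hq' : ∀ y ∈ q', y ∈ h :: t := fun y hy => hq y (List.mem_cons_of_mem _ hy)
      by_cases hx : x = h
      · subst hx
        have hstep : pvWalkB (x :: t) (x :: q') = pvWalkB (x :: t) q' := by
          show pvWalkB t ((x :: q').dropWhile (fun y => y == x)) = pvWalkB t (q'.dropWhile (fun y => y == x))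
          rw [List.dropWhile_cons_of_pos (by simp)]
        rw [hstep]
        refine (ihq hq').trans ?_
        cases q' with
        | nil => simp
        | cons z q2 =>
          rw [List.isChain_cons_cons]
          have hz : rk x ≤ rk z := by
            rcases List.mem_cons.mp (hq' z List.mem_cons_self) with rfl | hm
            · exact le_refl _
            · exact le_of_lt (hh z hm)
          exact ⟨fun hc => ⟨hz, hc⟩, fun hc => hc.2⟩
      · have hxt : x ∈ t := by
          rcases List.mem_cons.mp (hq x List.mem_cons_self) with rfl | hm
          · exact absurd rfl hx
          · exact hm
        have hstep : pvWalkB (h :: t) (x :: q') = pvWalkB t (x :: q') := by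
          show pvWalkB t ((x :: q').dropWhile (fun y => y == h)) = _
          rw [List.dropWhile_cons_of_neg (by simpa using hx)]
        rw [hstep]
        by_cases hhq : h ∈ q'
        · rw [pvWalkB_false_of_missing t (x :: q') ⟨h, List.mem_cons_of_mem _ hhq, hhnt⟩]
          simp only [Bool.false_eq_true, false_iff]
          exact not_chain_of_inner rk h t hh q' x hq' hxt hhq
        · have hsub : ∀ y ∈ x :: q', y ∈ t := by
            intro y hy
            rcases List.mem_cons.mp hy with rfl | hy'
            · exact hxt
            · rcases List.mem_cons.mp (hq' y hy') with rfl | hm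
              · exact absurd hy' hhq
              · exact hm
          exact ih (x :: q') ht hsub

-- A's scan-with-break succeeds iff the rank sequence, prefixed by last_index, is a ≤-chain
lemma pvLoopA_iff_chain (hier : List String) (l : List String) (last : Int) :
    pvLoopA hier l last = true ↔
      List.IsChain (· ≤ ·) (last :: l.map (fun p => ((pvRk hier p : Nat) : Int))) := by
  induction l generalizing last with
  | nil =>
    simp only [pvLoopA, List.map_nil]
    exact iff_of_true trivial (List.isChain_singleton _)
  | cons p rest ih =>
    simp only [pvLoopA, pvRk, List.map_cons, List.isChain_cons_cons]
    split_ifs with hlt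
    · constructor
      · intro h; exact absurd h (by simp)
      · intro h; omega
    · rw [ih]
      exact ⟨fun hc => ⟨by omega, hc⟩, fun hc => hc.2⟩

lemma isChain_neg_one_cons (xs : List Int) (hnn : ∀ x ∈ xs, 0 ≤ x) :
    List.IsChain (· ≤ ·) ((-1) :: xs) ↔ List.IsChain (· ≤ ·) xs := by
  cases xs with
  | nil => simp
  | cons a t =>
    have ha : (0 : Int) ≤ a := hnn a (by simp)
    rw [List.isChain_cons_cons]
    exact ⟨fun h => h.2, fun h => ⟨by omega, h⟩⟩

lemma pvLoopA_iff_chain_aux (hier : List String) (l : List String) :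
    (pvLoopA hier l (-1) = true ↔ List.IsChain (fun a b => pvRk hier a ≤ pvRk hier b) l) := by
  rw [pvLoopA_iff_chain hier l (-1),
    isChain_neg_one_cons _ (by
      intro x hx
      rcases List.mem_map.mp hx with ⟨p, -, rfl⟩
      exact Int.natCast_nonneg _),
    List.isChain_map]
  constructor
  · intro h
    exact h.imp (by intro a b hab; exact_mod_cast hab)
  · intro h
    exact h.imp (by intro a b hab; exact_mod_cast hab)

-- Python's `x in list` membership as used by both filters
lemma contains_pvDedupB_fst_eq (hier : List String) (p : String) :
    PySem.Set.contains (pvDedupB hier PySem.Set.empty).1 p = hier.contains p := by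
  rw [Bool.eq_iff_iff, PySem.Set.contains_iff, mem_pvDedupB_fst]
  simp [PySem.Set.empty]

-- ===== VERDICT (by name: the statement is the Claim_ definition above) =====
theorem check_parameter_order_spec : Claim_equal_check_parameter_order := by
  intro params hier _
  unfold Spec_check_parameter_order check_parameter_order check_parameter_order_alt
  simp only []
  have hfilter : params.filter (fun p => PySem.Set.contains (pvDedupB hier PySem.Set.empty).1 p)
      = params.filter (fun p => hier.contains p) :=
    List.filter_congr (fun p _ => contains_pvDedupB_fst_eq hier p)
  rw [hfilter]
  set filtered := params.filter (fun p => hier.contains p) with hfdef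
  -- the two correctness tests agree
  have hmemf : ∀ x ∈ filtered, x ∈ hier := by
    intro x hx
    have := List.of_mem_filter hx
    simpa [List.contains_iff_mem] using this
  have hmemu : ∀ x ∈ filtered, x ∈ (pvDedupB hier PySem.Set.empty).2 := by
    intro x hx
    rw [mem_pvDedupB_snd]
    exact ⟨hmemf x hx, by simp [PySem.Set.empty]⟩
  have hwalk : pvWalkB (pvDedupB hier PySem.Set.empty).2 filtered = true
      ↔ List.IsChain (fun a b => pvRk hier a ≤ pvRk hier b) filtered :=
    pvWalkB_iff_chain (pvRk hier) _ filtered (pairwise_pvDedupB hier PySem.Set.empty) hmemu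
  have hloop : pvLoopA hier filtered (-1) = true
      ↔ List.IsChain (fun a b => pvRk hier a ≤ pvRk hier b) filtered := by
    rw [pvLoopA_iff_chain_aux hier filtered]
  have hcond : pvLoopA hier filtered (-1) = pvWalkB (pvDedupB hier PySem.Set.empty).2 filtered := by
    by_cases hA : pvLoopA hier filtered (-1) = true
    · rw [hA, (hwalk.mpr (hloop.mp hA)).symm]
    · rcases Bool.eq_false_iff.mpr hA with h1
      have h2 : pvWalkB (pvDedupB hier PySem.Set.empty).2 filtered = false := by
        rw [Bool.eq_false_iff]
        intro hB
        exact hA (hloop.mpr (hwalk.mp hB))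
      rw [Bool.eq_false_iff.mpr hA, h2]
  rw [hcond]
  by_cases hB : pvWalkB (pvDedupB hier PySem.Set.empty).2 filtered = true
  · rw [if_pos hB, if_pos hB]
  · rw [if_neg hB, if_neg hB]
    have hexp : hier.filter (fun p => filtered.contains p)
        = hier.filter (fun p => PySem.Set.contains (PySem.Set.ofList filtered) p) :=
      List.filter_congr (fun p _ => by
        rw [Bool.eq_iff_iff, PySem.Set.contains_iff, PySem.Set.mem_ofList,
          List.contains_iff_mem])
    rw [hexp]
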